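-- pv_equiv track=rewrite | github.com/paiml/depyler | examples/hard_wave3_013.py | fraction_multiply
-- ===== SOURCE A (Python) =====
-- from typing import List, Tuple
--
-- def fraction_multiply(p1: int, q1: int, p2: int, q2: int) -> Tuple[int, int]:
--     """Multiply two fractions."""
--     num: int = p1 * p2
--     den: int = q1 * q2
--     g: int = num
--     h: int = den
--     if g < 0:
--         g = -g
--     if h < 0:
--         h = -h
--     while h != 0:
--         temp: int = h
--         h = g % h
--         g = temp
--     if g == 0:
--         g = 1
--     return (num // g, den // g)
-- ===== SOURCE B (Python) =====
-- def _gcd(a: int, b: int) -> int: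
--     return a if b == 0 else _gcd(b, a % b)
--
-- def fraction_multiply(p1: int, q1: int, p2: int, q2: int):
--     """Multiply two fractions, reducing via a recursive Euclidean gcd."""
--     num = p1 * p2
--     den = q1 * q2
--     g = _gcd(abs(num), abs(den))
--     if g == 0:
--         g = 1
--     return (num // g, den // g)
-- ===== Notes on version B (the rewrite author's own statement) =====
-- stated objective: simpler
-- what changed: The explicit abs-ifs and Euclidean while-loop with a temp variable are replaced by a recursive gcd helper called on abs(num) and abs(den).
import Mathlib
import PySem

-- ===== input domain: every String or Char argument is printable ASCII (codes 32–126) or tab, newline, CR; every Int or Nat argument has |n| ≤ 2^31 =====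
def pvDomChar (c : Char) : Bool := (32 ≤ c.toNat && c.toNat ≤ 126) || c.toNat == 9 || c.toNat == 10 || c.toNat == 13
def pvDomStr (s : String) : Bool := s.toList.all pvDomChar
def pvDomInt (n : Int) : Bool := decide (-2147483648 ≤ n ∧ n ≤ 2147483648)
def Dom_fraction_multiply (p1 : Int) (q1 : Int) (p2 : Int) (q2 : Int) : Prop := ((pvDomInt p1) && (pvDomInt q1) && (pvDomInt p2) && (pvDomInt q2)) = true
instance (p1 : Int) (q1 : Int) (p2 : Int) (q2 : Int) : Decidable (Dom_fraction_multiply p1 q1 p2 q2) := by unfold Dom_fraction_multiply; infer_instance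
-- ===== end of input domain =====

-- A multiplies two fractions and reduces via an inline Euclidean while-loop;
-- B is simpler: a recursive gcd helper called on abs(num), abs(den). Proved equal everywhere.


-- termination helper for the Euclidean recurrence (Python % takes the divisor's sign)
theorem pv_mod_natAbs_lt (g h : Int) (hh : h ≠ 0) : (PySem.Int.mod g h).natAbs < h.natAbs := by
  rcases lt_or_gt_of_ne hh with hn | hp
  · have := PySem.Int.mod_neg_bounds g hn
    omega
  · have h1 := PySem.Int.mod_nonneg g hp
    have h2 := PySem.Int.mod_lt g hp
    omega

-- ===== PORT A =====
-- the while-loop: state (g, h); 'while h != 0: temp = h; h = g % h; g = temp'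
def fmWhile (g : Int) (h : Int) : Int :=
  if hh : h ≠ 0 then
    fmWhile h (PySem.Int.mod g h)
  else g
termination_by h.natAbs
decreasing_by exact pv_mod_natAbs_lt g h hh

def fraction_multiply (p1 : Int) (q1 : Int) (p2 : Int) (q2 : Int) : Int × Int :=
  let num := p1 * p2
  let den := q1 * q2
  let g := num
  let h := den
  let g := if g < 0 then -g else g
  let h := if h < 0 then -h else h
  let g := fmWhile g h
  let g := if g == 0 then 1 else g
  (PySem.Int.floordiv num g, PySem.Int.floordiv den g)

-- ===== PORT B =====
-- _gcd(a, b) = a if b == 0 else _gcd(b, a % b)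
def gcdRec (a : Int) (b : Int) : Int :=
  if b == 0 then a else gcdRec b (PySem.Int.mod a b)
termination_by b.natAbs
decreasing_by exact pv_mod_natAbs_lt a b (by simpa using (by assumption : ¬ (b == 0) = true))

def fraction_multiply_alt (p1 : Int) (q1 : Int) (p2 : Int) (q2 : Int) : Int × Int :=
  let num := p1 * p2
  let den := q1 * q2
  let g := gcdRec |num| |den|
  let g := if g == 0 then 1 else g
  (PySem.Int.floordiv num g, PySem.Int.floordiv den g)

-- ===== PRECONDITION & SPEC =====
def Spec_fraction_multiply (p1 : Int) (q1 : Int) (p2 : Int) (q2 : Int) (out : Int × Int) : Prop := out = fraction_multiply_alt p1 q1 p2 q2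
instance (p1 : Int) (q1 : Int) (p2 : Int) (q2 : Int) (out : Int × Int) : Decidable (Spec_fraction_multiply p1 q1 p2 q2 out) := by unfold Spec_fraction_multiply; infer_instance

-- ===== CLAIM (what is proved, stated in full; the proofs are below) =====
def Claim_equal_fraction_multiply : Prop := ∀ (p1 : Int) (q1 : Int) (p2 : Int) (q2 : Int), Dom_fraction_multiply p1 q1 p2 q2 → Spec_fraction_multiply p1 q1 p2 q2 (fraction_multiply p1 q1 p2 q2)

-- ===== LEMMAS AND PROOFS =====
theorem fmWhile_eq_gcdRec (g h : Int) : fmWhile g h = gcdRec g h := by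
  induction g, h using fmWhile.induct with
  | case1 g h hh ih =>
    rw [fmWhile, gcdRec]
    rw [dif_pos hh, if_neg (show ¬ (h == 0) = true by simpa using hh)]
    exact ih
  | case2 g h hh =>
    rw [fmWhile, gcdRec]
    simp [hh]

theorem if_neg_abs (x : Int) : (if x < 0 then -x else x) = |x| := by
  by_cases hx : x < 0
  · simp [hx, abs_of_neg hx]
  · simp [hx, abs_of_nonneg (not_lt.mp hx)]

-- ===== VERDICT (by name: the statement is the Claim_ definition above) =====
theorem fraction_multiply_spec : Claim_equal_fraction_multiply := by
  intro p1 q1 p2 q2 _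
  unfold Spec_fraction_multiply fraction_multiply fraction_multiply_alt
  simp only [fmWhile_eq_gcdRec, if_neg_abs]
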